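-- pv_equiv track=rewrite | github.com/durych-yaroslav/BEST-Lviv-Hackathon2026 | backend/core/services.py | _build_property_index
-- ===== SOURCE A (Python) =====
-- from typing import Any, Dict, List, Optional, Tuple
--
-- def _norm_digits(value: Any) -> Optional[str]:
--     """Extract digits only from a value (for EDRPOU / tax number comparison)."""
--     if value is None:
--         return None
--     digits = "".join(c for c in str(value) if c.isdigit())
--     return digits or None
--
-- def _build_property_index(
--     property_rows: List[Dict[str, Any]],
-- ) -> Dict[str, List[int]]:
--     """Build index: normalised tax_number_of_pp digits → list of row indices."""
--     index: Dict[str, List[int]] = {}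
--     for i, row in enumerate(property_rows):
--         tax = _norm_digits(row.get("tax_number_of_pp"))
--         if tax:
--             index.setdefault(tax, []).append(i)
--     return index
-- ===== SOURCE B (Python) =====
-- def _build_property_index(property_rows):
--     # Phase 1: one pass collecting (index, normalised tax) pairs.
--     pairs = []
--     for i, row in enumerate(property_rows):
--         value = row.get("tax_number_of_pp")
--         if value is None:
--             continue
--         tax = "".join(c for c in str(value) if c.isdigit())
--         if tax:
--             pairs.append((i, tax))
--     # Phase 2: keys in first-occurrence order, then one scan per key.
--     keys = list(dict.fromkeys(t for _, t in pairs))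
--     return {k: [i for i, t in pairs if t == k] for k in keys}
-- ===== Notes on version B (the rewrite author's own statement) =====
-- stated objective: alternative
-- what changed: B replaces A's single pass that mutates per-key lists via dict.setdefault with a two-phase algorithm: collect (index, tax) pairs once, dedup the tax keys in first-occurrence order, then build each key's index list by a separate scan of the pairs.
import Mathlib
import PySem

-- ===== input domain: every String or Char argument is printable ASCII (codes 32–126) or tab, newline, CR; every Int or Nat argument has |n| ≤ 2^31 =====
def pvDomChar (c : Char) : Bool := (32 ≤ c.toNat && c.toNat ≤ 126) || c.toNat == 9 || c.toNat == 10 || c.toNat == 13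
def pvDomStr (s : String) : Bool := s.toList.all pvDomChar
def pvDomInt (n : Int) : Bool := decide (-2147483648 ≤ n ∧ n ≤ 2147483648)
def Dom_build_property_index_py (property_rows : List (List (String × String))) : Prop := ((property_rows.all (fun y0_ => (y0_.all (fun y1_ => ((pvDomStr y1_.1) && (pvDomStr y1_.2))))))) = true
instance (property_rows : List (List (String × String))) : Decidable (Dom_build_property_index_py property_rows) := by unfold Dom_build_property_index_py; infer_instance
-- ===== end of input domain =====

-- B builds the index in two phases (collect (index, tax) pairs, dedup keys, one scan per key)
-- instead of A's single setdefault-mutating pass; equally costly, genuinely different structure.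

-- ===== PORT A =====
-- row.get(k): first-match lookup in the association list representing the dict
def pyRowGet (row : List (String × String)) (k : String) : Option String :=
  (row.find? (fun p => p.1 == k)).map (·.2)

-- _norm_digits (argument is Optional[str] here: row.get result)
def pyNormDigits (value : Option String) : Option String :=
  match value with
  | none => none
  | some v =>
      let digits := String.mk (v.toList.filter PySem.Chars.isdigit)
      if digits = "" then none else some digits

def build_property_index_py (property_rows : List (List (String × String))) : List (String × List Int) :=
  ((PySem.List.enumerate property_rows 0).foldl
    (fun d p =>
      match pyNormDigits (pyRowGet p.2 "tax_number_of_pp") with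
      | some tax => d.modify tax [] (· ++ [p.1])   -- index.setdefault(tax, []).append(i)
      | none => d)
    PySem.Dict.empty).items

-- ===== PORT B =====
def build_property_index_py_alt (property_rows : List (List (String × String))) : List (String × List Int) :=
  let pairs := (PySem.List.enumerate property_rows 0).foldl
    (fun acc p =>
      match pyRowGet p.2 "tax_number_of_pp" with
      | none => acc
      | some v =>
          let tax := String.mk (v.toList.filter PySem.Chars.isdigit)
          if tax = "" then acc else acc ++ [(p.1, tax)])
    []
  let keys := PySem.List.dedup (pairs.map (·.2))     -- dict.fromkeys: first occurrences, in order
  keys.map (fun k => (k, (pairs.filter (fun q => q.2 == k)).map (·.1)))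

-- ===== PRECONDITION & SPEC =====
def Spec_build_property_index_py (property_rows : List (List (String × String))) (out : List (String × List Int)) : Prop := out = build_property_index_py_alt property_rows
instance (property_rows : List (List (String × String))) (out : List (String × List Int)) : Decidable (Spec_build_property_index_py property_rows out) := by unfold Spec_build_property_index_py; infer_instance

-- ===== CLAIM (what is proved, stated in full; the proofs are below) =====
def Claim_equal_build_property_index_py : Prop := ∀ (property_rows : List (List (String × String))), Dom_build_property_index_py property_rows → Spec_build_property_index_py property_rows (build_property_index_py property_rows)

-- ===== LEMMAS AND PROOFS =====

-- proof-side: the per-row extraction both ports perform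
def pvG (p : Int × List (String × String)) : Option (Int × String) :=
  (pyNormDigits (pyRowGet p.2 "tax_number_of_pp")).map (fun t => (p.1, t))

theorem pvA_fold_eq (l : List (Int × List (String × String)))
    (d : PySem.Dict String (List Int)) :
    l.foldl
      (fun d p =>
        match pyNormDigits (pyRowGet p.2 "tax_number_of_pp") with
        | some tax => d.modify tax [] (· ++ [p.1])
        | none => d) d
    = (l.filterMap pvG).foldl (fun d q => d.modify q.2 [] (· ++ [q.1])) d := by
  induction l generalizing d with
  | nil => rfl
  | cons x xs ih =>
      cases h : pyNormDigits (pyRowGet x.2 "tax_number_of_pp") with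
      | none => simp [List.foldl_cons, pvG, h, ih]
      | some tax => simp [List.foldl_cons, pvG, h, ih]

theorem pvB_pairs_eq (l : List (Int × List (String × String)))
    (acc : List (Int × String)) :
    l.foldl
      (fun acc p =>
        match pyRowGet p.2 "tax_number_of_pp" with
        | none => acc
        | some v =>
            let tax := String.mk (v.toList.filter PySem.Chars.isdigit)
            if tax = "" then acc else acc ++ [(p.1, tax)]) acc
    = acc ++ l.filterMap pvG := by
  induction l generalizing acc with
  | nil => simp
  | cons x xs ih =>
      cases h : pyRowGet x.2 "tax_number_of_pp" with
      | none => simp [List.foldl_cons, pvG, pyNormDigits, h, ih]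
      | some v =>
          by_cases he : String.mk (v.toList.filter PySem.Chars.isdigit) = ""
          · simp [List.foldl_cons, pvG, pyNormDigits, h, he, ih]
          · simp [List.foldl_cons, pvG, pyNormDigits, h, he, ih]

-- ===== VERDICT (by name: the statement is the Claim_ definition above) =====
theorem build_property_index_py_spec : Claim_equal_build_property_index_py := by
  intro rows _
  unfold Spec_build_property_index_py build_property_index_py build_property_index_py_alt
  rw [pvA_fold_eq, pvB_pairs_eq]
  set ps := (PySem.List.enumerate rows 0).filterMap pvG with hps
  -- reshape A's fold to the keyed-grouping shape
  have hsw : ps.foldl (fun d q => d.modify q.2 [] (· ++ [q.1])) PySem.Dict.empty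
      = (ps.map (fun q => (q.2, q.1))).foldl
          (fun d p => d.modify p.1 [] (· ++ [p.2])) PySem.Dict.empty := by
    rw [List.foldl_map]
  rw [hsw]
  set sw := ps.map (fun q => (q.2, q.1)) with hswdef
  set D := sw.foldl (fun d p => d.modify p.1 [] (· ++ [p.2])) PySem.Dict.empty with hD
  have hnd : D.keys.Nodup := by
    rw [hD]
    exact PySem.Dict.nodup_keys_foldl_modify_key sw Prod.fst []
      (fun d p => (· ++ [p.2])) PySem.Dict.empty (by simp)
  rw [PySem.Dict.items_eq_map_keys D hnd []]
  have hkeys : D.keys = PySem.List.dedup (ps.map (·.2)) := by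
    rw [hD]
    have := PySem.Dict.keys_foldl_modify_key sw Prod.fst []
      (fun d p => (· ++ [p.2])) (PySem.Dict.empty (κ := String) (ν := List Int))
    simp only [this]
    have : sw.map Prod.fst = ps.map (·.2) := by
      simp [hswdef, List.map_map, Function.comp]
    simp [this, PySem.Set.update, PySem.Set.ofList_eq_foldl, PySem.Dict.keys_empty]
  rw [hkeys]
  apply List.map_congr_left
  intro k hk
  have hval : D.getD k [] = (ps.filter (fun q => q.2 == k)).map (·.1) := by
    rw [hD, PySem.Dict.getD_foldl_modify_append]
    simp [hswdef, List.filter_map, List.map_map, Function.comp_def, PySem.Dict.getD_empty]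
  rw [hval]
  simp
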